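-- pv_equiv track=rewrite | github.com/vrthra/mimid | Cmimid/src/grammartools.py | collect_duplicate_rule_keys
-- ===== SOURCE A (Python) =====
-- def collect_duplicate_rule_keys(grammar):
--     collect = {}
--     for k in grammar:
--         salt = str(sorted(grammar[k]))
--         if salt not in collect:
--             collect[salt] = (k, set())
--         else:
--             collect[salt][1].add(k)
--     return collect
-- ===== SOURCE B (Python) =====
-- def collect_duplicate_rule_keys(grammar):
--     pairs = [(k, str(sorted(grammar[k]))) for k in grammar]
--     result = {}
--     for i, (k, salt) in enumerate(pairs):
--         if all(s != salt for _, s in pairs[:i]):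
--             result[salt] = (k, {k2 for k2, s2 in pairs[i + 1:] if s2 == salt})
--     return result
-- ===== Notes on version B (the rewrite author's own statement) =====
-- stated objective: alternative
-- what changed: B drops A's incrementally mutated dict-of-(first,set): it precomputes the (key,salt) pair list once and, for each position that is the first occurrence of its salt (checked by scanning the prefix), gathers the duplicate keys by scanning the suffix - a first-occurrence nested scan instead of a single-pass hash accumulation.
import Mathlib
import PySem

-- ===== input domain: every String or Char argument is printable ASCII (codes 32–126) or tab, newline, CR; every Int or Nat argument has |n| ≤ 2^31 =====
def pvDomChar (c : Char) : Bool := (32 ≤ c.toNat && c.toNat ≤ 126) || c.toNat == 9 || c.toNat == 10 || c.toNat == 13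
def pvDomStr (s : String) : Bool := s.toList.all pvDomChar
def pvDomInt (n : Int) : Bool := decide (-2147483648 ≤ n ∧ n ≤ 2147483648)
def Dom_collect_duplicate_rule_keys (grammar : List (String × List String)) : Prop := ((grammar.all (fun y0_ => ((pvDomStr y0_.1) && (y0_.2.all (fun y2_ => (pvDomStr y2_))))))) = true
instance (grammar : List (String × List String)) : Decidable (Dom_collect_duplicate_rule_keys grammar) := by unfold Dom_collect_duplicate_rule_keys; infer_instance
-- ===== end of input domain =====

-- B replaces A's single pass over a mutated dict-of-(first,set) by a first-occurrence nested scan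
-- over a precomputed (key, salt) list: a different algorithm of similar size (not faster).

-- Shared helper: both Pythons compute the literal expression str(sorted(grammar[k])).
-- Python repr of a string, exact for printable ASCII plus tab/newline/CR (the stated Dom).
def pyReprStrChars (s : String) : List Char :=
  let cs := s.toList
  let q : Char := if cs.contains '\'' && !(cs.contains '"') then '"' else '\''
  q :: (cs.flatMap (fun c =>
    if c = '\\' then ['\\', '\\']
    else if c = q then ['\\', q]
    else if c = '\t' then ['\\', 't']
    else if c = '\n' then ['\\', 'n']
    else if c = '\r' then ['\\', 'r']
    else [c])) ++ [q]

-- str(sorted(rules)):  "[" + ", ".join(repr(r) for r in sorted(rules)) + "]"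
def saltOf (rules : List String) : String :=
  String.ofList ('[' :: PySem.Chars.join [',', ' ']
    ((PySem.List.sorted rules (fun x => x) false).map pyReprStrChars) ++ [']'])

-- ===== PORT A =====
def collect_duplicate_rule_keys (grammar : List (String × List String)) : List (String × String × List String) :=
  let collect : PySem.Dict String (String × PySem.Set String) :=
    grammar.foldl (fun collect p =>
      let salt := saltOf p.2
      if collect.contains salt = false then
        collect.insert salt (p.1, PySem.Set.empty)
      else
        -- collect[salt][1].add(k): in-place update of the entry's set
        collect.modify salt ("", PySem.Set.empty) (fun v => (v.1, PySem.Set.add v.2 p.1))) PySem.Dict.empty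
  collect.items

-- ===== PORT B =====
-- the body of B's 'for i, (k, salt) in enumerate(pairs)' loop
def bstep (pairs : List (String × String)) (result : PySem.Dict String (String × PySem.Set String))
    (x : Int × (String × String)) : PySem.Dict String (String × PySem.Set String) :=
  -- if all(s != salt for _, s in pairs[:i]):
  if (PySem.List.slice pairs none (some x.1)).all (fun q => !(q.2 == x.2.2)) then
    -- result[salt] = (k, {k2 for k2, s2 in pairs[i+1:] if s2 == salt})
    result.insert x.2.2 (x.2.1,
      PySem.Set.ofList (((PySem.List.slice pairs (some (x.1 + 1)) none).filter
        (fun q => q.2 == x.2.2)).map Prod.fst))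
  else result

def collect_duplicate_rule_keys_alt (grammar : List (String × List String)) : List (String × String × List String) :=
  let pairs := grammar.map (fun p => (p.1, saltOf p.2))
  ((PySem.List.enumerate pairs).foldl (bstep pairs) PySem.Dict.empty).items

-- ===== PRECONDITION & SPEC =====
def Spec_collect_duplicate_rule_keys (grammar : List (String × List String)) (out : List (String × String × List String)) : Prop := out = collect_duplicate_rule_keys_alt grammar
instance (grammar : List (String × List String)) (out : List (String × String × List String)) : Decidable (Spec_collect_duplicate_rule_keys grammar out) := by unfold Spec_collect_duplicate_rule_keys; infer_instance

-- ===== CLAIM (what is proved, stated in full; the proofs are below) =====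
def Claim_equal_collect_duplicate_rule_keys : Prop := ∀ (grammar : List (String × List String)), Dom_collect_duplicate_rule_keys grammar → Spec_collect_duplicate_rule_keys grammar (collect_duplicate_rule_keys grammar)

-- ===== LEMMAS AND PROOFS =====

-- the value-level transform from a salt's full ordered key list to A's dict entry
def vtf (ks : List String) : String × PySem.Set String :=
  (PySem.List.pyGetD ks 0 "", PySem.Set.ofList (PySem.List.slice ks (some 1) none))

def tf (q : String × List String) : String × String × List String := (q.1, vtf q.2)

theorem vtf_cons (k : String) (t : List String) : vtf (k :: t) = (k, PySem.Set.ofList t) := by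
  simp [vtf, PySem.List.pyGetD_zero_cons, PySem.List.slice_from_one]

-- all keys whose salt is s, in order
def kW (s : String) (ps : List (String × String)) : List String :=
  (ps.filter (fun q => q.2 == s)).map Prod.fst

-- A-side loop body and the intermediate grouping loop body
def stepA (d : PySem.Dict String (String × PySem.Set String)) (p : String × List String) :
    PySem.Dict String (String × PySem.Set String) :=
  let salt := saltOf p.2
  if d.contains salt = false then d.insert salt (p.1, PySem.Set.empty)
  else d.modify salt ("", PySem.Set.empty) (fun v => (v.1, PySem.Set.add v.2 p.1))

def stepB (g : PySem.Dict String (List String)) (p : String × List String) :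
    PySem.Dict String (List String) :=
  g.modify (saltOf p.2) [] (fun ks => ks ++ [p.1])

def InvR (d : PySem.Dict String (String × PySem.Set String)) (g : PySem.Dict String (List String)) : Prop :=
  d.items = g.items.map tf ∧ ∀ q ∈ g.items, q.2 ≠ []

theorem contains_of_map (d : PySem.Dict String (String × PySem.Set String))
    (g : PySem.Dict String (List String)) (h : d.items = g.items.map tf) (s : String) :
    d.contains s = g.contains s := by
  rw [PySem.Dict.contains, PySem.Dict.contains, h, List.any_map]; rfl

theorem get?_of_map (d : PySem.Dict String (String × PySem.Set String))
    (g : PySem.Dict String (List String)) (h : d.items = g.items.map tf) (s : String) :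
    d.get? s = (g.get? s).map vtf := by
  rw [PySem.Dict.get?, PySem.Dict.get?, h, List.find?_map]
  simp only [Option.map_map]
  rfl

theorem vtf_append (ks : List String) (k : String) (hne : ks ≠ []) :
    vtf (ks ++ [k]) = ((vtf ks).1, PySem.Set.add (vtf ks).2 k) := by
  obtain ⟨a, t, rfl⟩ := List.exists_cons_of_ne_nil hne
  have h0 : (0:Int) ≤ (t.length:Int) + 1 := by positivity
  have htake : List.take (t.length + 1) (t ++ [k]) = t ++ [k] := by
    apply List.take_of_length_le; simp
  simp [vtf, PySem.List.pyGetD, PySem.List.pyGet?, PySem.List.pyIdx?, PySem.List.slice,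
    PySem.Set.ofList, h0, htake, List.foldl_append]

theorem step_inv (d : PySem.Dict String (String × PySem.Set String))
    (g : PySem.Dict String (List String)) (p : String × List String) (h : InvR d g) :
    InvR (stepA d p) (stepB g p) := by
  obtain ⟨hitems, hne⟩ := h
  have hc := contains_of_map d g hitems (saltOf p.2)
  by_cases hcon : g.contains (saltOf p.2) = true
  · -- salt already present: both replace every matching entry with one new value
    have hcA : d.contains (saltOf p.2) = true := by rw [hc]; exact hcon
    obtain ⟨gv, hgv⟩ : ∃ gv, g.get? (saltOf p.2) = some gv := by
      rcases hgvo : g.get? (saltOf p.2) with _ | gv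
      · exfalso
        have := (PySem.Dict.get?_eq_none_iff_contains g (saltOf p.2)).mp hgvo
        simp [hcon] at this
      · exact ⟨gv, rfl⟩
    have hgvne : gv ≠ [] := by
      have : ∃ q ∈ g.items, q.1 == saltOf p.2 ∧ q.2 = gv := by
        simp only [PySem.Dict.get?, Option.map_eq_some_iff] at hgv
        obtain ⟨q, hq1, hq2⟩ := hgv
        exact ⟨q, List.mem_of_find?_eq_some hq1, by
          have := List.find?_some hq1; exact ⟨this, hq2⟩⟩
      obtain ⟨q, hqmem, _, hq2⟩ := this
      exact hq2 ▸ hne q hqmem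
    have hdv : d.get? (saltOf p.2) = some (vtf gv) := by
      rw [get?_of_map d g hitems, hgv]; rfl
    constructor
    · have hBitems : (stepB g p).items
          = g.items.map (fun q => if q.1 == saltOf p.2 then (saltOf p.2, gv ++ [p.1]) else q) := by
        simp [stepB, PySem.Dict.modify, PySem.Dict.getD, hgv, PySem.Dict.insert, hcon]
      have hAitems : (stepA d p).items
          = d.items.map (fun q => if q.1 == saltOf p.2
              then (saltOf p.2, (vtf gv).1, PySem.Set.add (vtf gv).2 p.1) else q) := by
        simp [stepA, hcA, PySem.Dict.modify, PySem.Dict.getD, hdv, PySem.Dict.insert]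
      rw [hAitems, hitems, hBitems, List.map_map, List.map_map]
      apply List.map_congr_left
      intro q hq
      by_cases hqs : (q.1 == saltOf p.2) = true
      · simp [Function.comp, tf, hqs, vtf_append gv p.1 hgvne]
      · simp [Function.comp, tf, hqs]
    · intro q hq
      have hBitems : (stepB g p).items
          = g.items.map (fun q => if q.1 == saltOf p.2 then (saltOf p.2, gv ++ [p.1]) else q) := by
        simp [stepB, PySem.Dict.modify, PySem.Dict.getD, hgv, PySem.Dict.insert, hcon]
      rw [hBitems] at hq
      rcases List.mem_map.mp hq with ⟨q', hq', rfl⟩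
      by_cases hqs : (q'.1 == saltOf p.2) = true
      · simp [hqs]
      · rw [if_neg hqs]; exact hne q' hq'
  · -- fresh salt: both append one new entry
    have hcon' : g.contains (saltOf p.2) = false := by
      cases hcg : g.contains (saltOf p.2) with
      | false => rfl
      | true => exact absurd hcg hcon
    have hcA : d.contains (saltOf p.2) = false := by rw [hc]; exact hcon'
    have hgd : g.getD (saltOf p.2) [] = [] := by
      simp [PySem.Dict.getD, (PySem.Dict.get?_eq_none_iff_contains g (saltOf p.2)).mpr (by simp [hcon'])]
    constructor
    · simp [stepA, stepB, hcA, PySem.Dict.modify, hgd, PySem.Dict.insert, hcon', hitems, tf, vtf,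
        PySem.List.pyGetD, PySem.List.pyGet?, PySem.List.pyIdx?, PySem.List.slice,
        PySem.Set.ofList, PySem.Set.empty]
    · intro q hq
      simp [stepB, PySem.Dict.modify, hgd, PySem.Dict.insert, hcon'] at hq
      rcases hq with hq | rfl
      · exact hne q hq
      · simp

theorem fold_inv (l : List (String × List String)) (d : PySem.Dict String (String × PySem.Set String))
    (g : PySem.Dict String (List String)) (h : InvR d g) :
    InvR (l.foldl stepA d) (l.foldl stepB g) := by
  induction l generalizing d g with
  | nil => exact h
  | cons p t ih => exact ih _ _ (step_inv d g p h)

-- ===== the grouping fold in closed form =====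
theorem groupfold_items (l : List (String × List String)) :
    (l.foldl stepB PySem.Dict.empty).items
      = (PySem.Set.ofList (l.map (fun p => saltOf p.2))).map
          (fun s => (s, kW s (l.map (fun p => (p.1, saltOf p.2))))) := by
  have hkeys : (l.foldl stepB PySem.Dict.empty).keys
      = PySem.Set.ofList (l.map (fun p => saltOf p.2)) := by
    have := PySem.Dict.keys_foldl_modify_key l (fun p => saltOf p.2) []
      (fun _ p => fun ks => ks ++ [p.1]) PySem.Dict.empty
    simpa [stepB, PySem.Dict.keys_empty, PySem.Set.update_nil_left] using this
  have hnd : (l.foldl stepB PySem.Dict.empty).keys.Nodup := by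
    rw [hkeys]; exact PySem.Set.nodup_ofList _
  have hget : ∀ s, (l.foldl stepB PySem.Dict.empty).getD s []
      = kW s (l.map (fun p => (p.1, saltOf p.2))) := by
    intro s
    have hrw : l.foldl stepB PySem.Dict.empty
        = ((l.map (fun p => (saltOf p.2, p.1))).foldl
            (fun d q => d.modify q.1 [] (fun ks => ks ++ [q.2])) PySem.Dict.empty) := by
      rw [List.foldl_map]
      rfl
    rw [hrw, PySem.Dict.getD_foldl_modify_append]
    simp only [PySem.Dict.getD_empty, List.nil_append, kW, List.filter_map, List.map_map]
    rfl
  rw [PySem.Dict.items_eq_map_keys _ hnd [], hkeys]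
  exact List.map_congr_left (fun s _ => by rw [hget s])

-- ===== B's nested scan in closed form =====
theorem bfold_items (ps pre : List (String × String))
    (r : PySem.Dict String (String × PySem.Set String))
    (hr : ∀ s, r.contains s = true → s ∈ pre.map Prod.snd) :
    ((PySem.List.enumerate ps (pre.length : Int)).foldl (bstep (pre ++ ps)) r).items
      = r.items ++ ((PySem.Set.ofList (ps.map Prod.snd)).filter
          (fun s => !((pre.map Prod.snd).contains s))).map (fun s => tf (s, kW s ps)) := by
  induction ps generalizing pre r with
  | nil => simp [PySem.List.enumerate, PySem.Set.ofList_nil]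
  | cons p ps₂ ih =>
    rw [PySem.List.enumerate_cons]
    have hslice1 : PySem.List.slice (pre ++ p :: ps₂) none (some (pre.length : Int)) = pre := by
      rw [PySem.List.slice_to_natCast, List.take_left]
    have hslice2 : PySem.List.slice (pre ++ p :: ps₂) (some ((pre.length : Int) + 1)) none = ps₂ := by
      have h1 : ((pre.length : Int) + 1) = ((pre.length + 1 : Nat) : Int) := by push_cast; ring
      rw [h1, PySem.List.slice_from_natCast]
      simp
    have hcast : (pre.length : Int) + 1 = ((pre ++ [p]).length : Int) := by simp
    have hassoc : pre ++ p :: ps₂ = (pre ++ [p]) ++ ps₂ := by simp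
    -- the discarded-then-filtered survivors are exactly the filter by the extended prefix
    have htail : ((PySem.Set.ofList (ps₂.map Prod.snd)).discard p.2).filter
          (fun s => !((pre.map Prod.snd).contains s))
        = (PySem.Set.ofList (ps₂.map Prod.snd)).filter
          (fun s => !(((pre ++ [p]).map Prod.snd).contains s)) := by
      rw [PySem.Set.discard, List.filter_filter]
      apply List.filter_congr
      intro s _
      simp only [List.map_append, List.contains_append, Bool.not_or, List.map_cons, List.map_nil,
        List.contains_cons, List.contains_nil, Bool.or_false]
    have hsurv : ∀ s ∈ (PySem.Set.ofList (ps₂.map Prod.snd)).filter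
        (fun s => !(((pre ++ [p]).map Prod.snd).contains s)), (p.2 == s) = false := by
      intro s hs
      have h := List.of_mem_filter hs
      simp only [List.map_append, List.contains_append, Bool.not_or, Bool.and_eq_true,
        Bool.not_eq_true', List.map_cons, List.map_nil, List.contains_cons, List.contains_nil,
        Bool.or_false] at h
      have h2 := h.2
      simp only [beq_eq_false_iff_ne] at h2 ⊢
      exact h2.symm
    have hmapc : ∀ (L : List String), (∀ s ∈ L, (p.2 == s) = false) →
        L.map (fun s => tf (s, kW s (p :: ps₂))) = L.map (fun s => tf (s, kW s ps₂)) := by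
      intro L hL
      apply List.map_congr_left
      intro s hs
      have hk : kW s (p :: ps₂) = kW s ps₂ := by
        simp [kW, hL s hs]
      rw [hk]
    by_cases hC : (pre.all (fun q => !(q.2 == p.2))) = true
    · -- first occurrence of this salt: insert, then recurse
      have hfresh : p.2 ∉ pre.map Prod.snd := by
        simp only [List.all_eq_true] at hC
        intro hmem
        rcases List.mem_map.mp hmem with ⟨q, hq, hq2⟩
        have := hC q hq
        simp [hq2] at this
      have hrcon : r.contains p.2 = false := by
        cases hcr : r.contains p.2 with
        | false => rfl
        | true => exact absurd (hr _ hcr) hfresh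
      have hbody : bstep (pre ++ p :: ps₂) r ((pre.length : Int), p)
          = r.insert p.2 (p.1, PySem.Set.ofList (kW p.2 ps₂)) := by
        simp only [bstep, hslice1, hslice2, hC, if_true, kW]
      have hr' : ∀ s, (r.insert p.2 (p.1, PySem.Set.ofList (kW p.2 ps₂))).contains s = true →
          s ∈ (pre ++ [p]).map Prod.snd := by
        intro s hs
        rcases (PySem.Dict.mem_keys_insert _ _ _ _).mp
            ((PySem.Dict.contains_iff_mem_keys _ _).mp hs) with rfl | hsk'
        · simp
        · have := hr s ((PySem.Dict.contains_iff_mem_keys _ _).mpr hsk')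
          simp only [List.map_append]
          exact List.mem_append_left _ this
      rw [List.foldl_cons, hbody, hcast, hassoc, ih (pre ++ [p]) _ hr',
        PySem.Dict.items_insert_of_not_contains _ _ hrcon, List.append_assoc]
      congr 1
      have hp2 : (!((pre.map Prod.snd).contains p.2)) = true := by simpa using hfresh
      rw [List.map_cons, PySem.Set.ofList_cons,
        List.filter_cons_of_pos (p := fun s => !((pre.map Prod.snd).contains s)) hp2,
        List.map_cons, htail, hmapc _ hsurv]
      have hkw : kW p.2 (p :: ps₂) = p.1 :: kW p.2 ps₂ := by
        simp [kW]
      rw [hkw]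
      simp [tf, vtf_cons]
    · -- salt already seen in the prefix: skip, then recurse
      have hseen : p.2 ∈ pre.map Prod.snd := by
        by_contra hmem
        apply hC
        simp only [List.all_eq_true]
        intro q hq
        simp only [Bool.not_eq_true', beq_eq_false_iff_ne]
        intro he
        exact hmem (List.mem_map.mpr ⟨q, hq, he⟩)
      have hbody : bstep (pre ++ p :: ps₂) r ((pre.length : Int), p) = r := by
        simp only [bstep, hslice1]
        rw [if_neg (by simpa using hC)]
      have hr' : ∀ s, r.contains s = true → s ∈ (pre ++ [p]).map Prod.snd := by
        intro s hs
        simp only [List.map_append]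
        exact List.mem_append_left _ (hr s hs)
      rw [List.foldl_cons, hbody, hcast, hassoc, ih (pre ++ [p]) r hr']
      congr 1
      have hp2 : (!((pre.map Prod.snd).contains p.2)) = false := by simpa using hseen
      have hp2' : ¬ ((fun s => !((pre.map Prod.snd).contains s)) p.2 = true) := by
        show ¬ ((!((pre.map Prod.snd).contains p.2)) = true)
        rw [hp2]
        exact Bool.false_ne_true
      have hfc := List.filter_cons_of_neg (p := fun s => !((pre.map Prod.snd).contains s))
        (l := (PySem.Set.ofList (ps₂.map Prod.snd)).discard p.2) hp2'
      rw [List.map_cons, PySem.Set.ofList_cons, hfc, htail, hmapc _ hsurv]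

-- ===== VERDICT (by name: the statement is the Claim_ definition above) =====
theorem collect_duplicate_rule_keys_spec : Claim_equal_collect_duplicate_rule_keys := by
  intro grammar _
  unfold Spec_collect_duplicate_rule_keys collect_duplicate_rule_keys collect_duplicate_rule_keys_alt
  have hA := (fold_inv grammar PySem.Dict.empty PySem.Dict.empty
    ⟨rfl, by intro q hq; simp [PySem.Dict.empty] at hq⟩).1
  have hB := bfold_items (grammar.map (fun p => (p.1, saltOf p.2))) [] PySem.Dict.empty
    (by intro s hs; simp [PySem.Dict.contains, PySem.Dict.empty] at hs)
  simp only [List.nil_append, List.length_nil, Nat.cast_zero, List.map_nil, List.contains_nil,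
    Bool.not_false, List.filter_true] at hB
  show (grammar.foldl stepA PySem.Dict.empty).items
      = ((PySem.List.enumerate (grammar.map (fun p => (p.1, saltOf p.2)))).foldl
          (bstep (grammar.map (fun p => (p.1, saltOf p.2)))) PySem.Dict.empty).items
  rw [hA, groupfold_items, hB, List.map_map,
    show (grammar.map (fun p => (p.1, saltOf p.2))).map Prod.snd
      = grammar.map (fun p => saltOf p.2) from by rw [List.map_map]; rfl]
  rfl
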